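-- pv_equiv track=rewrite | github.com/sanhitamurthy/SearchEngine | Phase1/Task3/Source_Code/Task-3b/BM25.py | calc_query_freq
-- ===== SOURCE A (Python) =====
-- def calc_query_freq(query_term,invertedList):
--     query_frequency={}
--     i=0
--     while i < len(query_term):
--         if query_term[i] not in query_frequency:
--             query_frequency[query_term[i]] =1
--         else:
--             query_frequency[query_term[i]]=query_frequency[query_term[i]]+1
--         i += 1
--     for each_entry in invertedList:
--         if each_entry not in query_frequency:
--             query_frequency[each_entry]=0
--     return query_frequency
-- ===== SOURCE B (Python) =====
-- def calc_query_freq(query_term, invertedList):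
--     keys = list(dict.fromkeys(query_term))
--     extras = [e for e in dict.fromkeys(invertedList) if e not in keys]
--     return {**{t: query_term.count(t) for t in keys}, **{e: 0 for e in extras}}
-- ===== Notes on version B (the rewrite author's own statement) =====
-- stated objective: alternative
-- what changed: Instead of one incremental pass that updates a dict per element plus a conditional zero-fill loop, B assembles the result in stages: it dedups the query terms, computes each term's final frequency directly with query_term.count, lists the inverted-list entries not among the query terms as zero-valued extras, and merges the two comprehensions into one dict.
import Mathlib
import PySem

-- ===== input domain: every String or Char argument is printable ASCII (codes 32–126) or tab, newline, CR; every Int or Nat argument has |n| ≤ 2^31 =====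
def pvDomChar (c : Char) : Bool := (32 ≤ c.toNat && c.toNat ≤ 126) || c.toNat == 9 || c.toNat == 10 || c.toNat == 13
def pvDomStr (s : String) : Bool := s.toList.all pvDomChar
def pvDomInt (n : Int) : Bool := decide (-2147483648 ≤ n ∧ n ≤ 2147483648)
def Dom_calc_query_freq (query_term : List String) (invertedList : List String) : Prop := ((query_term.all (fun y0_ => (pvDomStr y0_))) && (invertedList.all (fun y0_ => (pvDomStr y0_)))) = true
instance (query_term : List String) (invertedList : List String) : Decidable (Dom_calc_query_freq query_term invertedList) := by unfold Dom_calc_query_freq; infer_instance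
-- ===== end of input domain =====

-- B assembles the dict in stages (ordered dedup, per-term count, zero extras, merge) instead of A's element-by-element dict updates; alternative decomposition, not faster.

-- ===== PORT A =====
-- A's while-loop over indices reading query_term[i] is ported as a fold over the elements (same values, same order)
def calc_query_freq (query_term : List String) (invertedList : List String) : List (String × Int) :=
  let qf := query_term.foldl
    (fun d t => if d.contains t = false then d.insert t 1 else d.insert t (d.getD t 0 + 1))
    PySem.Dict.empty
  let qf2 := invertedList.foldl
    (fun d e => if d.contains e = false then d.insert e 0 else d) qf
  qf2.items

-- ===== PORT B =====
-- keys are distinct and extras are distinct and disjoint from keys, so the merged dict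
-- {**comp1, **comp2} of Source B has as its association list exactly the two comprehensions' pairs in order
def calc_query_freq_alt (query_term : List String) (invertedList : List String) : List (String × Int) :=
  let keys := PySem.List.dedup query_term
  let extras := (PySem.List.dedup invertedList).filter (fun e => !(keys.contains e))
  keys.map (fun t => (t, (query_term.count t : Int))) ++ extras.map (fun e => (e, (0 : Int)))

-- ===== PRECONDITION & SPEC =====
def Spec_calc_query_freq (query_term : List String) (invertedList : List String) (out : List (String × Int)) : Prop := out = calc_query_freq_alt query_term invertedList
instance (query_term : List String) (invertedList : List String) (out : List (String × Int)) : Decidable (Spec_calc_query_freq query_term invertedList out) := by unfold Spec_calc_query_freq; infer_instance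

-- ===== CLAIM (what is proved, stated in full; the proofs are below) =====
def Claim_equal_calc_query_freq : Prop := ∀ (query_term : List String) (invertedList : List String), Dom_calc_query_freq query_term invertedList → Spec_calc_query_freq query_term invertedList (calc_query_freq query_term invertedList)

-- ===== LEMMAS AND PROOFS =====

-- A's counting step equals the Counter step: when t is absent, getD t 0 = 0
theorem stepA_eq_counter_step (d : PySem.Dict String Int) (t : String) :
    (if d.contains t = false then d.insert t 1 else d.insert t (d.getD t 0 + 1))
      = d.insert t (d.getD t 0 + 1) := by
  by_cases h : d.contains t = false
  · simp [h, PySem.Dict.getD_of_not_contains d 0 h]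
  · simp [h]

theorem phaseA_eq_counter (qt : List String) :
    qt.foldl (fun d t => if d.contains t = false then d.insert t 1 else d.insert t (d.getD t 0 + 1))
      PySem.Dict.empty = PySem.Dict.counter qt := by
  rw [← PySem.Dict.foldl_insert_getD_add_one_eq_counter]
  exact PySem.List.foldl_congr_mem qt _ _ _ (fun d a _ => stepA_eq_counter_step d a)

-- the zero-fill loop appends (e, 0) for each new distinct entry, in first-appearance order
theorem zfill_items (il : List String) (d : PySem.Dict String Int) :
    (il.foldl (fun d e => if d.contains e = false then d.insert e 0 else d) d).items
      = d.items ++ ((PySem.Set.ofList il).filter (fun e => !(d.contains e))).map (fun e => (e, (0 : Int))) := by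
  induction il generalizing d with
  | nil => simp [PySem.Set.ofList_nil]
  | cons e rest ih =>
    rw [List.foldl_cons, PySem.Set.ofList_cons]
    by_cases h : d.contains e = false
    · rw [if_pos h, ih, PySem.Dict.items_insert_of_not_contains d 0 h, List.append_assoc]
      congr 1
      rw [List.filter_cons]
      simp only [h, Bool.not_false, if_pos, List.map_cons]
      rw [PySem.Set.discard, List.filter_filter, List.singleton_append]
      congr 2
      apply List.filter_congr
      intro a _
      rw [PySem.Dict.contains_insert]
      cases hc : d.contains a <;> cases hb : (a == e) <;> simp
    · rw [if_neg h, ih]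
      congr 2
      have he : d.contains e = true := by revert h; cases d.contains e <;> simp
      rw [List.filter_cons]
      simp only [he, Bool.not_true, Bool.false_eq_true, reduceIte]
      rw [PySem.Set.discard, List.filter_filter]
      apply List.filter_congr
      intro a _
      cases hc : d.contains a
      · have hb : (a == e) = false := by
          apply beq_false_of_ne; intro hE; rw [hE, he] at hc; cases hc
        simp [hb]
      · simp

-- ===== VERDICT (by name: the statement is the Claim_ definition above) =====
theorem calc_query_freq_spec : Claim_equal_calc_query_freq := by
  intro qt il _
  unfold Spec_calc_query_freq calc_query_freq calc_query_freq_alt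
  rw [phaseA_eq_counter, zfill_items, PySem.Dict.items_counter]
  simp only [PySem.List.dedup_eq_ofList]
  congr 2
  apply List.filter_congr
  intro a _
  rw [PySem.Dict.contains_counter]
  simp
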